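-- pv_equiv track=rewrite | github.com/SWeszler/google-kickstart | 2020_B/B2/b2.py | solution_slow1
-- ===== SOURCE A (Python) =====
-- def solution_slow1(N, D, buses):
--     res = D
--     i = len(buses) - 1
--
--     while i >= 0:
--         for j in range(min(res, D), 0, -1):
--             if j % buses[i] == 0:
--                 res = min(res, j)
--                 i -= 1
--                 break
--     return res
-- ===== SOURCE B (Python) =====
-- def solution_slow1(N, D, buses):
--     # O(len(buses)): the largest positive multiple of abs(b) not exceeding res
--     # is res - res % abs(b); no downward scan needed.
--     res = D
--     for b in reversed(buses):
--         res -= res % abs(b)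
--     return res
-- ===== Notes on version B (the rewrite author's own statement) =====
-- stated objective: faster
-- what changed: Replaced the inner downward linear scan for the largest multiple of buses[i] with the arithmetic identity res -= res % abs(buses[i]) in a single reverse pass; intended as asymptotically faster (a timing run saw A time out at n=16 where B returned, but could not measure a ratio).
import Mathlib
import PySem

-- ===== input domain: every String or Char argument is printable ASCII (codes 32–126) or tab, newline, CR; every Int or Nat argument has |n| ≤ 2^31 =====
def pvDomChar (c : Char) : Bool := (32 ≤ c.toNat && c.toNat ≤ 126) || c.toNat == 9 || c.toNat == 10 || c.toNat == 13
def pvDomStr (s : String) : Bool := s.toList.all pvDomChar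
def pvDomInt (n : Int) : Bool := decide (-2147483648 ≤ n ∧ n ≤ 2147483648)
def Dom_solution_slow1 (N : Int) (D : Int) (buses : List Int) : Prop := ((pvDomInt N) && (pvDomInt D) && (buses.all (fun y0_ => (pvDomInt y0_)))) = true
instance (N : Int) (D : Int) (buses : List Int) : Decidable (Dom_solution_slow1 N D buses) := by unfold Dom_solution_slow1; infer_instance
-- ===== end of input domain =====

-- B replaces A's inner downward scan by the identity res -= res % abs(b); intended as asymptotically
-- faster (a timing run saw A time out at n=16 where B returned; no ratio could be measured).

-- ===== PORT A =====
-- inner 'for j in range(min(res, D), 0, -1): if j % buses[i] == 0: found j' — downward scan;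
-- returns none when the range is exhausted (Python then loops forever in the outer while)
def pvScanA (j : Int) (b : Int) : Option Int :=
  if h : 1 ≤ j then
    if PySem.Int.mod j b = 0 then some j
    else pvScanA (j - 1) b
  else none
termination_by j.toNat
decreasing_by omega

-- outer 'while i >= 0' loop; when the inner scan finds no multiple Python diverges,
-- so that branch (excluded by Pre_) just returns res
def pvLoopA (res : Int) (i : Int) (D : Int) (buses : List Int) : Int :=
  if h : 0 ≤ i then
    match pvScanA (min res D) ((PySem.List.pyGet? buses i).getD 0) with
    | some j => pvLoopA (min res j) (i - 1) D buses
    | none => res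
  else res
termination_by (i + 1).toNat
decreasing_by omega

def solution_slow1 (N : Int) (D : Int) (buses : List Int) : Int :=
  pvLoopA D ((buses.length : Int) - 1) D buses

-- ===== PORT B =====
def solution_slow1_alt (N : Int) (D : Int) (buses : List Int) : Int :=
  buses.reverse.foldl (fun res b => res - PySem.Int.mod res |b|) D

-- ===== PRECONDITION & SPEC =====
-- Pre_ excludes exactly the inputs where A does not return: a zero bus (ZeroDivisionError) or a
-- step where the running value has no positive multiple of the bus (A's while loop never ends).
-- A's termination domain is inherently sequential, hence the recursive condition.
def pvOk (res : Int) : List Int → Bool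
  | [] => true
  | b :: t => if 1 ≤ |b| ∧ |b| ≤ res then pvOk (res - PySem.Int.mod res |b|) t else false

def Pre_solution_slow1 (N : Int) (D : Int) (buses : List Int) : Prop :=
  pvOk D buses.reverse = true

instance (N : Int) (D : Int) (buses : List Int) : Decidable (Pre_solution_slow1 N D buses) := by
  unfold Pre_solution_slow1; infer_instance

def pvWitness_solution_slow1 : Int × Int × List Int := (0, 10, [4, 3])

def Spec_solution_slow1 (N : Int) (D : Int) (buses : List Int) (out : Int) : Prop := out = solution_slow1_alt N D buses
instance (N : Int) (D : Int) (buses : List Int) (out : Int) : Decidable (Spec_solution_slow1 N D buses out) := by unfold Spec_solution_slow1; infer_instance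

-- ===== CLAIM (what is proved, stated in full; the proofs are below) =====
def Claim_equal_solution_slow1 : Prop := ∀ (N : Int) (D : Int) (buses : List Int), Dom_solution_slow1 N D buses → Pre_solution_slow1 N D buses → Spec_solution_slow1 N D buses (solution_slow1 N D buses)

-- ===== LEMMAS AND PROOFS =====

-- the inner scan finds exactly the largest multiple of |b| below j
theorem pvScanA_eq (b : Int) : ∀ (n : Nat) (j : Int), j.toNat ≤ n → 1 ≤ |b| → |b| ≤ j →
    pvScanA j b = some (j - PySem.Int.mod j |b|) := by
  intro n
  induction n with
  | zero => intro j hj hb hbj; omega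
  | succ n ih =>
    intro j hj hb hbj
    have h1 : 1 ≤ j := le_trans hb hbj
    rw [pvScanA, dif_pos h1]
    by_cases hz : PySem.Int.mod j b = 0
    · rw [if_pos hz]
      have : PySem.Int.mod j |b| = 0 := by
        rw [PySem.Int.mod_eq_zero_iff_dvd] at hz ⊢
        exact (abs_dvd _ _).mpr hz
      rw [this]; ring_nf
    · rw [if_neg hz]
      have hbne : b ≠ 0 := by intro h; rw [h] at hb; simp at hb
      have hmodz : PySem.Int.mod j |b| ≠ 0 := by
        intro h
        rw [PySem.Int.mod_eq_zero_iff_dvd] at hz h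
        exact hz ((abs_dvd _ _).mp h)
      have hpos : (0:Int) < |b| := hb
      have hme : PySem.Int.mod j |b| = j % |b| := PySem.Int.mod_eq_emod_of_pos hpos
      have hme' : PySem.Int.mod (j-1) |b| = (j-1) % |b| := PySem.Int.mod_eq_emod_of_pos hpos
      have hnn : 0 ≤ j % |b| := Int.emod_nonneg _ (by omega)
      have hlt : j % |b| < |b| := Int.emod_lt_of_pos _ hpos
      have hmz : j % |b| ≠ 0 := by rwa [hme] at hmodz
      -- |b| = 1 would force j % |b| = 0
      have hb2 : 2 ≤ |b| := by
        rcases lt_or_ge 1 |b| with h | h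
        · omega
        · exfalso; apply hmz
          have : |b| = 1 := le_antisymm h hb
          simp [this]
      have hstep : (j - 1) % |b| = j % |b| - 1 := by
        have h1m : (1:Int) % |b| = 1 := Int.emod_eq_of_lt (by norm_num) (by omega)
        have := Int.sub_emod j 1 |b|
        rw [h1m] at this
        rw [this, Int.emod_eq_of_lt (by omega) (by omega)]
      have hrec : pvScanA (j - 1) b = some ((j-1) - PySem.Int.mod (j-1) |b|) := by
        apply ih
        · omega
        · exact hb
        · -- |b| ≤ j - 1 : since j % |b| ≠ 0, j is not a multiple, so j > |b| is not forced
          -- directly: j ≥ |b| and j ≠ |b| (else j % |b| = 0)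
          rcases eq_or_lt_of_le hbj with h | h
          · exfalso; apply hmz; rw [← h]; simp
          · omega
      rw [hrec, hme, hme', hstep]; ring_nf

-- the outer loop over indices n-1 … 0 equals the fold over the reversed n-prefix
theorem pvLoopA_eq : ∀ (n : Nat) (buses : List Int) (D res : Int), n ≤ buses.length →
    1 ≤ res → res ≤ D → pvOk res ((buses.take n).reverse) = true →
    pvLoopA res ((n : Int) - 1) D buses
      = ((buses.take n).reverse).foldl (fun res b => res - PySem.Int.mod res |b|) res := by
  intro n
  induction n with
  | zero =>
    intro buses D res _ _ _ _
    rw [pvLoopA, dif_neg (by omega)]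
    simp
  | succ n ih =>
    intro buses D res hn h1 hD hok
    have hlt : n < buses.length := by omega
    have htake : (buses.take (n+1)).reverse = buses[n] :: (buses.take n).reverse := by
      rw [List.take_add_one]
      simp [List.getElem?_eq_getElem hlt]
    set b := buses[n] with hb
    rw [htake] at hok
    rw [pvOk] at hok
    by_cases hc : 1 ≤ |b| ∧ |b| ≤ res
    swap
    · rw [if_neg hc] at hok; exact absurd hok (by simp)
    rw [if_pos hc] at hok
    obtain ⟨hb1, hbr⟩ := hc
    have hget : (PySem.List.pyGet? buses ((n:Int) + 1 - 1)).getD 0 = b := by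
      have : ((n:Int) + 1 - 1) = (n:Int) := by ring
      rw [this, PySem.List.pyGet?_natCast, List.getElem?_eq_getElem hlt]
      rfl
    have hscan : pvScanA (min res D) b = some (res - PySem.Int.mod res |b|) := by
      rw [min_eq_left hD]
      exact pvScanA_eq b res.toNat res (le_refl _) hb1 hbr
    have hpos : (0:Int) < |b| := hb1
    have hme : PySem.Int.mod res |b| = res % |b| := PySem.Int.mod_eq_emod_of_pos hpos
    have hnn : 0 ≤ res % |b| := Int.emod_nonneg _ (by omega)
    have hlt' : res % |b| < |b| := Int.emod_lt_of_pos _ hpos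
    have hmin : min res (res - PySem.Int.mod res |b|) = res - PySem.Int.mod res |b| := by
      rw [hme]; omega
    have hcast : ((n + 1 : Nat) : Int) - 1 = (n : Int) + 1 - 1 := by push_cast; ring
    rw [hcast, pvLoopA, dif_pos (by omega), hget, hscan]
    simp only [hmin]
    have hstep : ((n:Int) + 1 - 1) - 1 = (n : Int) - 1 := by ring
    rw [hstep, ih buses D (res - PySem.Int.mod res |b|) (by omega) (by rw [hme]; omega)
        (by rw [hme]; omega) hok]
    rw [htake]
    rfl

-- ===== VERDICT (by name: the statement is the Claim_ definition above) =====
theorem solution_slow1_spec : Claim_equal_solution_slow1 := by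
  intro N D buses _ hpre
  unfold Spec_solution_slow1 solution_slow1 solution_slow1_alt
  unfold Pre_solution_slow1 at hpre
  cases hbs : buses with
  | nil => rw [pvLoopA]; simp
  | cons x xs =>
    subst hbs
    -- D ≥ 1 from the first processed bus
    have hD : 1 ≤ D := by
      have hne : (x :: xs).reverse ≠ [] := by simp
      cases hrev : (x :: xs).reverse with
      | nil => exact absurd hrev hne
      | cons b t =>
        rw [hrev, pvOk] at hpre
        by_cases hc : 1 ≤ |b| ∧ |b| ≤ D
        · omega
        · rw [if_neg hc] at hpre; exact absurd hpre (by simp)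
    have := pvLoopA_eq (x :: xs).length (x :: xs) D D (le_refl _) hD (le_refl _)
      (by rw [List.take_length]; exact hpre)
    rw [List.take_length] at this
    exact this
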